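-- pv_equiv track=rewrite | github.com/GeoBarnes/AdventofCode | Day13.py | is_mirror_col
-- ===== SOURCE A (Python) =====
-- def column(matrix, i):
--     return [row[i] for row in matrix]
--
-- def is_mirror_col(pattern, mirror_col):
--     j = 0
--     is_mirror_col = True
--     try:
--         while column(pattern, mirror_col + j ) and (mirror_col - 1 - j) >= 0 :
--             if column(pattern, mirror_col + j ) != column(pattern, mirror_col - 1 - j):
--                 is_mirror_col = False
--             j += 1
--     except:
--         pass
--     return is_mirror_col
-- ===== SOURCE B (Python) =====
-- def is_mirror_col(pattern, mirror_col):
--     # Transpose (zip-style: truncated to the shortest row), then compare the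
--     # two sides of the axis over their overlap with one slice equality.
--     w = min((len(r) for r in pattern), default=0)
--     cols = [[r[i] for r in pattern] for i in range(w)]
--     m = max(mirror_col, 0)
--     left = cols[:m][::-1]
--     right = cols[m:]
--     n = min(len(left), len(right))
--     return left[:n] == right[:n]
-- ===== Notes on version B (the rewrite author's own statement) =====
-- stated objective: simpler
-- what changed: Replaces the outward try/except column-by-column scan carrying a flag with building the transpose once and comparing the reversed left side with the right side over their overlap by a single slice equality.
import Mathlib
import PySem

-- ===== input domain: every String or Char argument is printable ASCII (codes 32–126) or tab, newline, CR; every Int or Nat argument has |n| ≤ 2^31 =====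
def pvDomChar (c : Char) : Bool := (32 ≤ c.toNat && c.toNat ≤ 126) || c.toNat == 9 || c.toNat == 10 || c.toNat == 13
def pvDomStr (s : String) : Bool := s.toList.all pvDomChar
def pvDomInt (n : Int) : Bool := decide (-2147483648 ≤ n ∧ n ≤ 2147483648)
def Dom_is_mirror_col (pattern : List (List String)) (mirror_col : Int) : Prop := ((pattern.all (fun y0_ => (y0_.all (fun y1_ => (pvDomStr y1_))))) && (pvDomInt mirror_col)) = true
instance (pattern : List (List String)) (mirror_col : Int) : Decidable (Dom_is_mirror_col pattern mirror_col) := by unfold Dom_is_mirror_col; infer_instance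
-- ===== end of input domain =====

-- B builds the transpose once and compares the reversed left side with the right side of the
-- axis by a single slice equality, instead of A's outward try/except column scan; objective: simpler.

-- ===== PORT A =====
-- column(matrix, i) = [row[i] for row in matrix]; none = the IndexError some row[i] raises.
def pvColumn (matrix : List (List String)) (i : Int) : Option (List String) :=
  match matrix with
  | [] => some []
  | r :: rs =>
    match PySem.List.pyGet? r i, pvColumn rs i with
    | some x, some xs => some (x :: xs)
    | _, _ => none

-- the while-loop of A, state (j, is_mirror_col flag); `none` from pvColumn = the caught exception
def pvLoopA (pattern : List (List String)) (m : Int) (j : Int) (flag : Bool) : Bool :=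
  match pvColumn pattern (m + j) with
  | none => flag                                  -- exception in the while condition: caught, return flag
  | some c =>
    if _h : c ≠ [] ∧ m - 1 - j ≥ 0 then
      match pvColumn pattern (m - 1 - j) with
      | none => flag                              -- exception in the body: caught, return flag
      | some c' =>
        pvLoopA pattern m (j + 1) (if c ≠ c' then false else flag)
    else flag
termination_by (m - j).toNat
decreasing_by omega

def is_mirror_col (pattern : List (List String)) (mirror_col : Int) : Bool :=
  pvLoopA pattern mirror_col 0 true

-- ===== PORT B =====
-- w = min((len(r) for r in pattern), default=0)
def pvW (pattern : List (List String)) : Nat := ((pattern.map List.length).min?).getD 0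

-- cols = [[r[i] for r in pattern] for i in range(w)]; r[i] has i < w ≤ len r, so getD is exact here
def pvCols (pattern : List (List String)) : List (List String) :=
  (List.range (pvW pattern)).map (fun i => pattern.map (fun r => r.getD i ""))

def is_mirror_col_alt (pattern : List (List String)) (mirror_col : Int) : Bool :=
  let cols := pvCols pattern
  let m := (max mirror_col 0).toNat               -- m = max(mirror_col, 0); slicing by it is take/drop
  let left := (cols.take m).reverse               -- cols[:m][::-1]
  let right := cols.drop m                        -- cols[m:]
  let n := min left.length right.length
  decide (left.take n = right.take n)             -- left[:n] == right[:n]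

-- ===== PRECONDITION & SPEC =====
def Spec_is_mirror_col (pattern : List (List String)) (mirror_col : Int) (out : Bool) : Prop := out = is_mirror_col_alt pattern mirror_col
instance (pattern : List (List String)) (mirror_col : Int) (out : Bool) : Decidable (Spec_is_mirror_col pattern mirror_col out) := by unfold Spec_is_mirror_col; infer_instance

-- ===== CLAIM (what is proved, stated in full; the proofs are below) =====
def Claim_equal_is_mirror_col : Prop := ∀ (pattern : List (List String)) (mirror_col : Int), Dom_is_mirror_col pattern mirror_col → Spec_is_mirror_col pattern mirror_col (is_mirror_col pattern mirror_col)

-- ===== LEMMAS AND PROOFS =====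

-- overlap length of the two sides of the axis (M = clamped mirror_col)
def pvN (pattern : List (List String)) (M : Nat) : Nat :=
  min (min M (pvW pattern)) (pvW pattern - M)

theorem pvW_le (pattern : List (List String)) (r : List String) (hr : r ∈ pattern) :
    pvW pattern ≤ r.length := by
  unfold pvW
  cases h : (pattern.map List.length).min? with
  | none =>
    rw [List.min?_eq_none_iff] at h
    simp [List.map_eq_nil_iff] at h
    subst h; cases hr
  | some a =>
    rw [List.min?_eq_some_iff] at h
    exact h.2 _ (List.mem_map_of_mem hr)

theorem pvW_attained (pattern : List (List String)) (hp : pattern ≠ []) :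
    ∃ r ∈ pattern, r.length = pvW pattern := by
  unfold pvW
  cases h : (pattern.map List.length).min? with
  | none =>
    rw [List.min?_eq_none_iff] at h
    simp [List.map_eq_nil_iff] at h
    exact absurd h hp
  | some a =>
    rw [List.min?_eq_some_iff] at h
    rcases List.mem_map.mp h.1 with ⟨r, hr, hlen⟩
    exact ⟨r, hr, by simp [hlen]⟩

theorem pvColumn_some (matrix : List (List String)) (i : Int) (h0 : 0 ≤ i)
    (h : ∀ r ∈ matrix, i < (r.length : Int)) :
    pvColumn matrix i = some (matrix.map (fun r => r.getD i.toNat "")) := by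
  induction matrix with
  | nil => rfl
  | cons r rs ih =>
    have hr : i < (r.length : Int) := h r (by simp)
    have h1 : PySem.List.pyGet? r i = some (r.getD i.toNat "") := by
      rw [PySem.List.pyGet?_of_nonneg r h0]
      rw [List.getElem?_eq_getElem (by omega), List.getD_eq_getElem _ _ (by omega)]
    rw [pvColumn, h1, ih (fun r hr => h r (by simp [hr]))]
    simp

theorem pvColumn_none (matrix : List (List String)) (i : Int)
    (h : ∃ r ∈ matrix, (r.length : Int) ≤ i) :
    pvColumn matrix i = none := by
  induction matrix with
  | nil => simp at h
  | cons r rs ih =>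
    rw [pvColumn]
    rcases h with ⟨s, hs, hlen⟩
    rcases List.mem_cons.mp hs with rfl | hs'
    · have : PySem.List.pyGet? s i = none := by
        rw [PySem.List.pyGet?_eq_none_iff]
        simp [PySem.Raise.InRange]; omega
      rw [this]
    · rw [ih ⟨s, hs', hlen⟩]
      cases PySem.List.pyGet? r i <;> rfl

theorem pvCols_length (pattern : List (List String)) : (pvCols pattern).length = pvW pattern := by
  simp [pvCols]

theorem pvCols_getD (pattern : List (List String)) (i : Nat) (hi : i < pvW pattern) :
    (pvCols pattern).getD i [] = pattern.map (fun r => r.getD i "") := by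
  unfold pvCols
  rw [List.getD_eq_getElem _ _ (by simpa using hi)]
  simp

-- pvColumn below the min width, expressed through pvCols
theorem pvColumn_lt (pattern : List (List String)) (i : Int) (h0 : 0 ≤ i)
    (hi : i.toNat < pvW pattern) :
    pvColumn pattern i = some ((pvCols pattern).getD i.toNat []) := by
  rw [pvCols_getD pattern i.toNat hi]
  exact pvColumn_some pattern i h0 (fun r hr => by
    have := pvW_le pattern r hr; omega)

theorem pvColumn_ge (pattern : List (List String)) (hp : pattern ≠ []) (i : Int)
    (hi : (pvW pattern : Int) ≤ i) :
    pvColumn pattern i = none := by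
  rcases pvW_attained pattern hp with ⟨r, hr, hlen⟩
  exact pvColumn_none pattern i ⟨r, hr, by omega⟩

-- loop invariant of A: pvLoopA returns flag ∧ "all remaining mirrored pairs in the overlap agree"
theorem pvLoopA_char (pattern : List (List String)) (m : Int) (hp : pattern ≠ []) (hm : 1 ≤ m) :
    ∀ (k j : Nat) (flag : Bool), pvN pattern m.toNat - j ≤ k →
      pvLoopA pattern m (j : Int) flag
        = (flag && decide (∀ i, i < pvN pattern m.toNat → j ≤ i →
            (pvCols pattern).getD (m.toNat + i) [] = (pvCols pattern).getD (m.toNat - 1 - i) [])) := by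
  intro k
  induction k with
  | zero =>
    intro j flag hk
    have hn : pvN pattern m.toNat ≤ j := by omega
    have hvac : (∀ i, i < pvN pattern m.toNat → j ≤ i →
        (pvCols pattern).getD (m.toNat + i) [] = (pvCols pattern).getD (m.toNat - 1 - i) []) := by
      intro i hi hji; omega
    rw [pvLoopA]
    simp only [decide_eq_true hvac, Bool.and_true]
    set M := m.toNat with hM
    set w := pvW pattern with hw
    have hNdef : pvN pattern M = min (min M w) (w - M) := rfl
    by_cases hcase : (M + j : Nat) < w
    · have h1 : pvColumn pattern (m + j) = some ((pvCols pattern).getD (M + j) []) := by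
        have := pvColumn_lt pattern (m + j) (by omega) (by omega)
        rwa [show (m + (j:Int)).toNat = M + j by omega] at this
      rw [h1]
      have hjM : ¬ (m - 1 - j ≥ 0) := by
        intro hge
        have : j < pvN pattern M := by rw [hNdef]; omega
        omega
      dsimp only
      rw [dif_neg (fun hc => hjM hc.2)]
    · have h1 : pvColumn pattern (m + j) = none :=
        pvColumn_ge pattern hp _ (by omega)
      rw [h1]
  | succ k ih =>
    intro j flag hk
    set M := m.toNat with hM
    set w := pvW pattern with hw
    have hNdef : pvN pattern M = min (min M w) (w - M) := rfl
    by_cases hj : j < pvN pattern M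
    · have hjM : j < M := by rw [hNdef] at hj; omega
      have hjw : M + j < w := by rw [hNdef] at hj; omega
      have h1 : pvColumn pattern (m + j) = some ((pvCols pattern).getD (M + j) []) := by
        have := pvColumn_lt pattern (m + j) (by omega) (by omega)
        rwa [show (m + (j:Int)).toNat = M + j by omega] at this
      have h2 : pvColumn pattern (m - 1 - j) = some ((pvCols pattern).getD (M - 1 - j) []) := by
        have := pvColumn_lt pattern (m - 1 - j) (by omega) (by omega)
        rwa [show (m - 1 - (j:Int)).toNat = M - 1 - j by omega] at this
      have hne : (pvCols pattern).getD (M + j) [] ≠ [] := by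
        rw [pvCols_getD pattern (M + j) hjw]
        simp [hp]
      rw [pvLoopA, h1]
      dsimp only
      rw [dif_pos ⟨hne, by omega⟩, h2]
      dsimp only
      have hcast : ((j : Int) + 1) = ((j + 1 : Nat) : Int) := by push_cast; ring
      rw [hcast, ih (j+1) _ (by omega)]
      set c := (pvCols pattern).getD (M + j) []
      set c' := (pvCols pattern).getD (M - 1 - j) []
      have hsplit : (∀ i, i < pvN pattern M → j ≤ i → (pvCols pattern).getD (M + i) [] = (pvCols pattern).getD (M - 1 - i) [])
          ↔ (c = c' ∧ ∀ i, i < pvN pattern M → j + 1 ≤ i → (pvCols pattern).getD (M + i) [] = (pvCols pattern).getD (M - 1 - i) []) := by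
        constructor
        · intro hall
          exact ⟨hall j hj (le_refl _), fun i hi hji => hall i hi (by omega)⟩
        · rintro ⟨hj0, hrest⟩ i hi hji
          rcases eq_or_lt_of_le hji with rfl | hlt
          · exact hj0
          · exact hrest i hi (by omega)
      rw [decide_eq_decide.mpr hsplit, Bool.decide_and]
      by_cases hcc : c = c'
      · simp [hcc]
      · simp [hcc]
    · have hvac : (∀ i, i < pvN pattern M → j ≤ i →
          (pvCols pattern).getD (M + i) [] = (pvCols pattern).getD (M - 1 - i) []) := by
        intro i hi hji; omega
      rw [pvLoopA]
      simp only [decide_eq_true hvac, Bool.and_true]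
      by_cases hcase : (M + j : Nat) < w
      · have h1 : pvColumn pattern (m + j) = some ((pvCols pattern).getD (M + j) []) := by
          have := pvColumn_lt pattern (m + j) (by omega) (by omega)
          rwa [show (m + (j:Int)).toNat = M + j by omega] at this
        rw [h1]
        have hjM : ¬ (m - 1 - j ≥ 0) := by
          intro hge
          have : j < pvN pattern M := by rw [hNdef]; omega
          omega
        dsimp only
        rw [dif_neg (fun hc => hjM hc.2)]
      · have h1 : pvColumn pattern (m + j) = none :=
          pvColumn_ge pattern hp _ (by omega)
        rw [h1]

-- B's slice equality says exactly "all mirrored pairs in the overlap agree"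
theorem pvSlice_iff (pattern : List (List String)) (M : Nat) (hMw : M < pvW pattern) :
    (((pvCols pattern).take M).reverse.take (pvN pattern M) = ((pvCols pattern).drop M).take (pvN pattern M))
    ↔ (∀ i, i < pvN pattern M → (pvCols pattern).getD (M + i) [] = (pvCols pattern).getD (M - 1 - i) []) := by
  set w := pvW pattern with hw
  set cols := pvCols pattern with hcols
  have hlen : cols.length = w := pvCols_length pattern
  have hN : pvN pattern M = min M (w - M) := by
    unfold pvN; omega
  have hL : ((cols.take M).reverse).length = M := by
    simp [hlen]; omega
  have hR : (cols.drop M).length = w - M := by simp [hlen]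
  have hnL : pvN pattern M ≤ M := by omega
  have hnR : pvN pattern M ≤ w - M := by omega
  have hTlen : (List.take M cols).length = M := by simp [hlen]; omega
  constructor
  · intro heq i hi
    have h1 := congrArg (fun l => l[i]?) heq
    simp only [List.getElem?_take, List.getElem?_drop, if_pos hi] at h1
    rw [List.getElem?_reverse (by omega), hTlen, List.getElem?_take, if_pos (by omega)] at h1
    rw [List.getD_eq_getElem?_getD, List.getD_eq_getElem?_getD, h1]
  · intro hall
    apply List.ext_getElem
    · simp [hL, hR]; omega
    · intro i h1 h2
      rw [List.getElem_take, List.getElem_take, List.getElem_reverse, List.getElem_take, List.getElem_drop]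
      have hi : i < pvN pattern M := (by simpa [hL] using h1 : i < pvN pattern M ∧ i < M).1
      have h := hall i hi
      rw [List.getD_eq_getElem _ _ (show M + i < cols.length by omega),
          List.getD_eq_getElem _ _ (show M - 1 - i < cols.length by omega)] at h
      simp only [hTlen]
      exact h.symm

theorem pv_main (pattern : List (List String)) (mc : Int) :
    is_mirror_col pattern mc = is_mirror_col_alt pattern mc := by
  by_cases hp : pattern = []
  · subst hp
    have hL : is_mirror_col [] mc = true := by
      unfold is_mirror_col
      rw [pvLoopA]
      exact dif_neg (fun hc => hc.1 rfl)
    rw [hL]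
    simp [is_mirror_col_alt, pvCols, pvW]
  by_cases hm : 1 ≤ mc
  case neg =>
    have hL : is_mirror_col pattern mc = true := by
      unfold is_mirror_col
      rw [pvLoopA]
      cases hcol : pvColumn pattern (mc + 0) with
      | none => rfl
      | some c =>
        dsimp only
        exact dif_neg (fun hc => by have := hc.2; omega)
    rw [hL]
    have h0 : max mc 0 = 0 := max_eq_right (by omega)
    simp [is_mirror_col_alt, h0]
  case pos =>
    set M := mc.toNat with hM
    set w := pvW pattern with hw
    have hchar := pvLoopA_char pattern mc hp hm (pvN pattern M) 0 true (by rw [hM]; omega)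
    have hL : is_mirror_col pattern mc
        = decide (∀ i, i < pvN pattern M → (pvCols pattern).getD (M + i) [] = (pvCols pattern).getD (M - 1 - i) []) := by
      unfold is_mirror_col
      rw [show (0:Int) = ((0:Nat):Int) by simp, hchar, Bool.true_and]
      apply decide_eq_decide.mpr
      constructor
      · intro h i hi; exact h i hi (Nat.zero_le i)
      · intro h i hi _; exact h i hi
    rw [hL]
    have hmax : (max mc 0).toNat = M := by rw [max_eq_left (by omega)]
    have hlen : (pvCols pattern).length = w := pvCols_length pattern
    have hnexpr : min ((List.take M (pvCols pattern)).reverse).length ((List.drop M (pvCols pattern)).length)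
        = pvN pattern M := by
      simp [hlen]
      unfold pvN
      omega
    show _ = is_mirror_col_alt pattern mc
    unfold is_mirror_col_alt
    simp only [hmax, hnexpr]
    by_cases hMw : M < w
    · exact (decide_eq_decide.mpr (pvSlice_iff pattern M hMw)).symm
    · have hN0 : pvN pattern M = 0 := by unfold pvN; omega
      rw [hN0]
      simp

-- ===== VERDICT (by name: the statement is the Claim_ definition above) =====
theorem is_mirror_col_spec : Claim_equal_is_mirror_col := by
  intro pattern mirror_col _
  show is_mirror_col pattern mirror_col = is_mirror_col_alt pattern mirror_col
  exact pv_main pattern mirror_col
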